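-- pv_equiv track=rewrite | github.com/tori29umai0123/SAM3DBody_utills | tools/sync_presets_with_npz.py | _rebuild_ui_tuple_body
-- ===== SOURCE A (Python) =====
-- _CATEGORIES = [
--     ("face",     ("face_", "chin_")),
--     ("neck",     ("neck_",)),
--     ("chest",    ("breast_", "chest_")),
--     ("shoulder", ("shoulder_",)),
--     ("waist",    ("waist_", "hip_")),
--     ("limbs",    ("limb_", "hand_", "foot_")),
-- ]
--
-- def _categorize(name: str) -> str:
--     for cat, prefixes in _CATEGORIES:
--         if any(name.startswith(p) for p in prefixes):
--             return cat
--     return "other"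
--
-- def _rebuild_ui_tuple_body(ordered_shapes: list) -> str:
--     """Group `ordered_shapes` by category (preserving the order inside
--     each category) and emit the tuple body with `# category` comments."""
--     cat_to_items = {cat: [] for cat, _ in _CATEGORIES}
--     cat_to_items["other"] = []
--     for n in ordered_shapes:
--         cat_to_items.setdefault(_categorize(n), []).append(n)
--
--     lines = ["("]
--     for cat, _ in _CATEGORIES:
--         items = cat_to_items.get(cat, [])
--         if not items:
--             continue
--         lines.append(f"    # {cat}")
--         lines.append("    " + ", ".join(f'"{n}"' for n in items) + ",")
--     if cat_to_items.get("other"):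
--         lines.append("    # other")
--         lines.append("    " + ", ".join(f'"{n}"' for n in cat_to_items["other"]) + ",")
--     lines.append(")")
--     return "\n".join(lines)
-- ===== SOURCE B (Python) =====
-- _CATEGORIES = [
--     ("face",     ("face_", "chin_")),
--     ("neck",     ("neck_",)),
--     ("chest",    ("breast_", "chest_")),
--     ("shoulder", ("shoulder_",)),
--     ("waist",    ("waist_", "hip_")),
--     ("limbs",    ("limb_", "hand_", "foot_")),
-- ]
--
-- def _rebuild_ui_tuple_body(ordered_shapes: list) -> str:
--     """Category-outer decomposition: no dict; each category filters the
--     shape list itself, 'other' is the negation over all prefixes."""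
--     def segment(cat, items):
--         if not items:
--             return []
--         return ["    # " + cat,
--                 "    " + ", ".join('"%s"' % n for n in items) + ","]
--
--     all_prefixes = [p for _, ps in _CATEGORIES for p in ps]
--     groups = [(cat, [n for n in ordered_shapes
--                      if any(n.startswith(p) for p in ps)])
--               for cat, ps in _CATEGORIES]
--     groups.append(("other", [n for n in ordered_shapes
--                              if not any(n.startswith(p) for p in all_prefixes)]))
--     body = [ln for cat, items in groups for ln in segment(cat, items)]
--     return "\n".join(["("] + body + [")"])
-- ===== Notes on version B (the rewrite author's own statement) =====
-- stated objective: alternative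
-- what changed: Replaced A's single-pass dict grouping (setdefault/append keyed by a first-match categorizer) with a category-outer decomposition: no dict at all, each category filters the shape list by its own prefixes and 'other' is the filter matching no prefix, segments emitted directly.
import Mathlib
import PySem

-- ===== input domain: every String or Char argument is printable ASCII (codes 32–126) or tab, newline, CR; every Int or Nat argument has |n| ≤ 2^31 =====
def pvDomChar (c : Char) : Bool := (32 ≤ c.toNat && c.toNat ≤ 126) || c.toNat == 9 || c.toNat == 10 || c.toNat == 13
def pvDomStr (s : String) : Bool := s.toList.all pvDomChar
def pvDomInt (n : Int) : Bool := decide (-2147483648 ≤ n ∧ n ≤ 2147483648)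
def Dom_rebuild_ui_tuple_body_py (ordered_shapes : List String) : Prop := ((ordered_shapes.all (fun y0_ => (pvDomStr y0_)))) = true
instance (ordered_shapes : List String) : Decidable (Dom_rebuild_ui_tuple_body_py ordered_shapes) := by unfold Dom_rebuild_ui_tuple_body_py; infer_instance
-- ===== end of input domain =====

-- B replaces A's single-pass dict grouping by a category-outer decomposition
-- (each category filters the shape list itself; no dict): objective 'alternative'.

-- ===== PORT A =====
-- the module constant _CATEGORIES (shared data of both versions)
def pvCategories : List (String × List String) :=
  [("face",     ["face_", "chin_"]),
   ("neck",     ["neck_"]),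
   ("chest",    ["breast_", "chest_"]),
   ("shoulder", ["shoulder_"]),
   ("waist",    ["waist_", "hip_"]),
   ("limbs",    ["limb_", "hand_", "foot_"])]

-- _categorize: for-loop with early return → structural recursion over the list
def pvCategorizeGo (name : String) : List (String × List String) → String
  | [] => "other"
  | (cat, prefixes) :: rest =>
      if prefixes.any (fun p => PySem.Str.startswith name p) then cat
      else pvCategorizeGo name rest

def pvCategorize (name : String) : String := pvCategorizeGo name pvCategories

def pvQuoteJoin (items : List String) : String :=
  "    " ++ PySem.Str.join ", " (items.map (fun n => "\"" ++ n ++ "\"")) ++ ","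

def rebuild_ui_tuple_body_py (ordered_shapes : List String) : String :=
  -- cat_to_items = {cat: [] for cat, _ in _CATEGORIES}; cat_to_items["other"] = []
  let d0 : PySem.Dict String (List String) :=
    (pvCategories.foldl (fun d cp => d.insert cp.1 ([] : List String)) PySem.Dict.empty).insert "other" []
  -- for n in ordered_shapes: cat_to_items.setdefault(_categorize(n), []).append(n)
  let d := ordered_shapes.foldl (fun d n => d.modify (pvCategorize n) [] (· ++ [n])) d0
  -- lines = ["("]; for cat, _ in _CATEGORIES: …
  let lines := pvCategories.foldl (fun lines cp =>
      let items := d.getD cp.1 []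
      if items.isEmpty then lines
      else lines ++ ["    # " ++ cp.1, pvQuoteJoin items]) ["("]
  -- if cat_to_items.get("other"): …
  let lines := if (d.getD "other" []).isEmpty then lines
               else lines ++ ["    # other", pvQuoteJoin (d.getD "other" [])]
  PySem.Str.join "\n" (lines ++ [")"])

-- ===== PORT B =====
def pvSegment (cat : String) (items : List String) : List String :=
  if items.isEmpty then []
  else ["    # " ++ cat, pvQuoteJoin items]

def rebuild_ui_tuple_body_py_alt (ordered_shapes : List String) : String :=
  let allPrefixes := pvCategories.flatMap (fun cp => cp.2)
  let groups :=
    (pvCategories.map (fun cp =>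
        (cp.1, ordered_shapes.filter (fun n => cp.2.any (fun p => PySem.Str.startswith n p)))))
    ++ [("other", ordered_shapes.filter
          (fun n => !(allPrefixes.any (fun p => PySem.Str.startswith n p))))]
  let body := groups.flatMap (fun g => pvSegment g.1 g.2)
  PySem.Str.join "\n" (["("] ++ body ++ [")"])

-- ===== PRECONDITION & SPEC =====
def Spec_rebuild_ui_tuple_body_py (ordered_shapes : List String) (out : String) : Prop := out = rebuild_ui_tuple_body_py_alt ordered_shapes
instance (ordered_shapes : List String) (out : String) : Decidable (Spec_rebuild_ui_tuple_body_py ordered_shapes out) := by unfold Spec_rebuild_ui_tuple_body_py; infer_instance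

-- ===== CLAIM (what is proved, stated in full; the proofs are below) =====
def Claim_equal_rebuild_ui_tuple_body_py : Prop := ∀ (ordered_shapes : List String), Dom_rebuild_ui_tuple_body_py ordered_shapes → Spec_rebuild_ui_tuple_body_py ordered_shapes (rebuild_ui_tuple_body_py ordered_shapes)

-- ===== LEMMAS AND PROOFS =====

-- shorthand used only by the proofs
def pvMatches (n : String) (ps : List String) : Bool := ps.any (fun p => PySem.Str.startswith n p)

theorem pvExcl (n : String) (ps qs : List String)
    (hinc : ∀ p ∈ ps, ∀ q ∈ qs, ¬(p.toList <+: q.toList) ∧ ¬(q.toList <+: p.toList))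
    (h : pvMatches n ps = true) : pvMatches n qs = false := by
  simp only [pvMatches, List.any_eq_true] at h
  obtain ⟨p, hp, hsp⟩ := h
  simp only [pvMatches, List.any_eq_false]
  intro q hq
  simp only [Bool.not_eq_true]
  rw [Bool.eq_false_iff]
  intro hsq
  rw [PySem.Str.startswith_eq, PySem.Chars.startswith_iff] at hsp hsq
  rcases (List.prefix_or_prefix_of_prefix hsp hsq) with h1 | h1
  · exact (hinc p hp q hq).1 h1
  · exact (hinc p hp q hq).2 h1

theorem pvGetD_loop (ordered_shapes : List String) (d0 : PySem.Dict String (List String)) (c : String) :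
    (ordered_shapes.foldl (fun d n => d.modify (pvCategorize n) [] (· ++ [n])) d0).getD c []
      = d0.getD c [] ++ ordered_shapes.filter (fun n => pvCategorize n == c) := by
  have h := PySem.Dict.getD_foldl_modify_append
    (l := ordered_shapes.map (fun n => (pvCategorize n, n))) (d := d0) (c := c)
  rw [List.foldl_map] at h
  rw [h, List.filter_map]
  simp only [Function.comp_def, List.map_map]
  simp

theorem pvMatches_append (n : String) (ps qs : List String) :
    pvMatches n (ps ++ qs) = (pvMatches n ps || pvMatches n qs) := by
  simp [pvMatches]

theorem pvCat_waist (n : String) : (pvCategorize n == "waist") = pvMatches n ["waist_", "hip_"] := by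
  have fold : ∀ ps, (ps.any fun p => PySem.Str.startswith n p) = pvMatches n ps := fun _ => rfl
  simp only [pvCategorize, pvCategories, pvCategorizeGo, fold]
  by_cases h1 : pvMatches n ["face_", "chin_"] = true
  · rw [if_pos h1, pvExcl n ["face_", "chin_"] ["waist_", "hip_"] (by decide) h1]; decide
  by_cases h2 : pvMatches n ["neck_"] = true
  · rw [if_neg h1, if_pos h2, pvExcl n ["neck_"] ["waist_", "hip_"] (by decide) h2]; decide
  by_cases h3 : pvMatches n ["breast_", "chest_"] = true
  · rw [if_neg h1, if_neg h2, if_pos h3, pvExcl n ["breast_", "chest_"] ["waist_", "hip_"] (by decide) h3]; decide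
  by_cases h4 : pvMatches n ["shoulder_"] = true
  · rw [if_neg h1, if_neg h2, if_neg h3, if_pos h4, pvExcl n ["shoulder_"] ["waist_", "hip_"] (by decide) h4]; decide
  by_cases h5 : pvMatches n ["waist_", "hip_"] = true
  · rw [if_neg h1, if_neg h2, if_neg h3, if_neg h4, if_pos h5, h5]; decide
  rw [if_neg h1, if_neg h2, if_neg h3, if_neg h4, if_neg h5,
      Bool.eq_false_iff.mpr h5]
  by_cases h6 : pvMatches n ["limb_", "hand_", "foot_"] = true
  · rw [if_pos h6]; decide
  · rw [if_neg h6]; decide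
theorem pvCat_face (n : String) : (pvCategorize n == "face") = pvMatches n ["face_", "chin_"] := by
  have fold : ∀ ps, (ps.any fun p => PySem.Str.startswith n p) = pvMatches n ps := fun _ => rfl
  simp only [pvCategorize, pvCategories, pvCategorizeGo, fold]
  by_cases h1 : pvMatches n ["face_", "chin_"] = true
  · rw [if_pos h1, h1]; decide
  rw [if_neg h1, Bool.eq_false_iff.mpr h1]
  by_cases h2 : pvMatches n ["neck_"] = true
  · rw [if_pos h2]; decide
  rw [if_neg h2]
  by_cases h3 : pvMatches n ["breast_", "chest_"] = true
  · rw [if_pos h3]; decide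
  rw [if_neg h3]
  by_cases h4 : pvMatches n ["shoulder_"] = true
  · rw [if_pos h4]; decide
  rw [if_neg h4]
  by_cases h5 : pvMatches n ["waist_", "hip_"] = true
  · rw [if_pos h5]; decide
  rw [if_neg h5]
  by_cases h6 : pvMatches n ["limb_", "hand_", "foot_"] = true
  · rw [if_pos h6]; decide
  rw [if_neg h6]
  decide

theorem pvCat_neck (n : String) : (pvCategorize n == "neck") = pvMatches n ["neck_"] := by
  have fold : ∀ ps, (ps.any fun p => PySem.Str.startswith n p) = pvMatches n ps := fun _ => rfl
  simp only [pvCategorize, pvCategories, pvCategorizeGo, fold]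
  by_cases h1 : pvMatches n ["face_", "chin_"] = true
  · rw [if_pos h1, pvExcl n ["face_", "chin_"] ["neck_"] (by decide) h1]; decide
  by_cases h2 : pvMatches n ["neck_"] = true
  · rw [if_neg h1, if_pos h2, h2]; decide
  rw [if_neg h1, if_neg h2, Bool.eq_false_iff.mpr h2]
  by_cases h3 : pvMatches n ["breast_", "chest_"] = true
  · rw [if_pos h3]; decide
  rw [if_neg h3]
  by_cases h4 : pvMatches n ["shoulder_"] = true
  · rw [if_pos h4]; decide
  rw [if_neg h4]
  by_cases h5 : pvMatches n ["waist_", "hip_"] = true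
  · rw [if_pos h5]; decide
  rw [if_neg h5]
  by_cases h6 : pvMatches n ["limb_", "hand_", "foot_"] = true
  · rw [if_pos h6]; decide
  rw [if_neg h6]
  decide

theorem pvCat_chest (n : String) : (pvCategorize n == "chest") = pvMatches n ["breast_", "chest_"] := by
  have fold : ∀ ps, (ps.any fun p => PySem.Str.startswith n p) = pvMatches n ps := fun _ => rfl
  simp only [pvCategorize, pvCategories, pvCategorizeGo, fold]
  by_cases h1 : pvMatches n ["face_", "chin_"] = true
  · rw [if_pos h1, pvExcl n ["face_", "chin_"] ["breast_", "chest_"] (by decide) h1]; decide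
  by_cases h2 : pvMatches n ["neck_"] = true
  · rw [if_neg h1, if_pos h2, pvExcl n ["neck_"] ["breast_", "chest_"] (by decide) h2]; decide
  by_cases h3 : pvMatches n ["breast_", "chest_"] = true
  · rw [if_neg h1, if_neg h2, if_pos h3, h3]; decide
  rw [if_neg h1, if_neg h2, if_neg h3, Bool.eq_false_iff.mpr h3]
  by_cases h4 : pvMatches n ["shoulder_"] = true
  · rw [if_pos h4]; decide
  rw [if_neg h4]
  by_cases h5 : pvMatches n ["waist_", "hip_"] = true
  · rw [if_pos h5]; decide
  rw [if_neg h5]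
  by_cases h6 : pvMatches n ["limb_", "hand_", "foot_"] = true
  · rw [if_pos h6]; decide
  rw [if_neg h6]
  decide

theorem pvCat_shoulder (n : String) : (pvCategorize n == "shoulder") = pvMatches n ["shoulder_"] := by
  have fold : ∀ ps, (ps.any fun p => PySem.Str.startswith n p) = pvMatches n ps := fun _ => rfl
  simp only [pvCategorize, pvCategories, pvCategorizeGo, fold]
  by_cases h1 : pvMatches n ["face_", "chin_"] = true
  · rw [if_pos h1, pvExcl n ["face_", "chin_"] ["shoulder_"] (by decide) h1]; decide
  by_cases h2 : pvMatches n ["neck_"] = true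
  · rw [if_neg h1, if_pos h2, pvExcl n ["neck_"] ["shoulder_"] (by decide) h2]; decide
  by_cases h3 : pvMatches n ["breast_", "chest_"] = true
  · rw [if_neg h1, if_neg h2, if_pos h3, pvExcl n ["breast_", "chest_"] ["shoulder_"] (by decide) h3]; decide
  by_cases h4 : pvMatches n ["shoulder_"] = true
  · rw [if_neg h1, if_neg h2, if_neg h3, if_pos h4, h4]; decide
  rw [if_neg h1, if_neg h2, if_neg h3, if_neg h4, Bool.eq_false_iff.mpr h4]
  by_cases h5 : pvMatches n ["waist_", "hip_"] = true
  · rw [if_pos h5]; decide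
  rw [if_neg h5]
  by_cases h6 : pvMatches n ["limb_", "hand_", "foot_"] = true
  · rw [if_pos h6]; decide
  rw [if_neg h6]
  decide

theorem pvCat_limbs (n : String) : (pvCategorize n == "limbs") = pvMatches n ["limb_", "hand_", "foot_"] := by
  have fold : ∀ ps, (ps.any fun p => PySem.Str.startswith n p) = pvMatches n ps := fun _ => rfl
  simp only [pvCategorize, pvCategories, pvCategorizeGo, fold]
  by_cases h1 : pvMatches n ["face_", "chin_"] = true
  · rw [if_pos h1, pvExcl n ["face_", "chin_"] ["limb_", "hand_", "foot_"] (by decide) h1]; decide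
  by_cases h2 : pvMatches n ["neck_"] = true
  · rw [if_neg h1, if_pos h2, pvExcl n ["neck_"] ["limb_", "hand_", "foot_"] (by decide) h2]; decide
  by_cases h3 : pvMatches n ["breast_", "chest_"] = true
  · rw [if_neg h1, if_neg h2, if_pos h3, pvExcl n ["breast_", "chest_"] ["limb_", "hand_", "foot_"] (by decide) h3]; decide
  by_cases h4 : pvMatches n ["shoulder_"] = true
  · rw [if_neg h1, if_neg h2, if_neg h3, if_pos h4, pvExcl n ["shoulder_"] ["limb_", "hand_", "foot_"] (by decide) h4]; decide
  by_cases h5 : pvMatches n ["waist_", "hip_"] = true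
  · rw [if_neg h1, if_neg h2, if_neg h3, if_neg h4, if_pos h5, pvExcl n ["waist_", "hip_"] ["limb_", "hand_", "foot_"] (by decide) h5]; decide
  by_cases h6 : pvMatches n ["limb_", "hand_", "foot_"] = true
  · rw [if_neg h1, if_neg h2, if_neg h3, if_neg h4, if_neg h5, if_pos h6, h6]; decide
  rw [if_neg h1, if_neg h2, if_neg h3, if_neg h4, if_neg h5, if_neg h6, Bool.eq_false_iff.mpr h6]
  decide

theorem pvCat_other (n : String) :
    (pvCategorize n == "other")
      = !(pvMatches n ["face_", "chin_", "neck_", "breast_", "chest_", "shoulder_", "waist_", "hip_", "limb_", "hand_", "foot_"]) := by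
  have fold : ∀ ps, (ps.any fun p => PySem.Str.startswith n p) = pvMatches n ps := fun _ => rfl
  simp only [pvCategorize, pvCategories, pvCategorizeGo, fold]
  rw [show pvMatches n ["face_", "chin_", "neck_", "breast_", "chest_", "shoulder_", "waist_", "hip_", "limb_", "hand_", "foot_"]
      = pvMatches n (["face_", "chin_"] ++ (["neck_"] ++ (["breast_", "chest_"] ++ (["shoulder_"] ++ (["waist_", "hip_"] ++ ["limb_", "hand_", "foot_"]))))) from rfl]
  simp only [pvMatches_append]
  by_cases h1 : pvMatches n ["face_", "chin_"] = true
  · simp [h1]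
  rw [if_neg h1, Bool.eq_false_iff.mpr h1]
  by_cases h2 : pvMatches n ["neck_"] = true
  · simp [h2]
  rw [if_neg h2, Bool.eq_false_iff.mpr h2]
  by_cases h3 : pvMatches n ["breast_", "chest_"] = true
  · simp [h3]
  rw [if_neg h3, Bool.eq_false_iff.mpr h3]
  by_cases h4 : pvMatches n ["shoulder_"] = true
  · simp [h4]
  rw [if_neg h4, Bool.eq_false_iff.mpr h4]
  by_cases h5 : pvMatches n ["waist_", "hip_"] = true
  · simp [h5]
  rw [if_neg h5, Bool.eq_false_iff.mpr h5]
  by_cases h6 : pvMatches n ["limb_", "hand_", "foot_"] = true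
  · simp [h6]
  rw [if_neg h6, Bool.eq_false_iff.mpr h6]
  decide

theorem pv_ite_append {c : Prop} [inst : Decidable c] (L y : List String) :
    (if c then L else L ++ y) = L ++ (if c then [] else y) := by
  split <;> simp

theorem pv_main (ordered_shapes : List String) :
    rebuild_ui_tuple_body_py ordered_shapes = rebuild_ui_tuple_body_py_alt ordered_shapes := by
  unfold rebuild_ui_tuple_body_py rebuild_ui_tuple_body_py_alt
  simp only [pv_ite_append]
  simp only [PySem.List.foldl_append_eq_flatMap]
  simp only [pvGetD_loop]
  simp only [pvCategories, List.foldl, List.flatMap, List.map]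
  simp only [PySem.Dict.getD_insert, PySem.Dict.getD_empty]
  simp only [pvCat_face, pvCat_neck, pvCat_chest, pvCat_shoulder, pvCat_waist, pvCat_limbs, pvCat_other, pvMatches]
  simp only [pvSegment]
  simp [List.append_assoc]

-- ===== VERDICT (by name: the statement is the Claim_ definition above) =====
theorem rebuild_ui_tuple_body_py_spec : Claim_equal_rebuild_ui_tuple_body_py := by
  intro ordered_shapes _
  unfold Spec_rebuild_ui_tuple_body_py
  exact pv_main ordered_shapes
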